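-- pv_equiv track=rewrite | github.com/LatifAkram/automatiion_latest | src/core/ultra_complex_automation_handler.py | _analyze_special_requirements
-- ===== SOURCE A (Python) =====
-- from typing import Dict, List, Any, Optional, Union, Callable
--
-- def _analyze_special_requirements(description: str, keywords: List[str]) -> Dict[str, bool]:
--     """Analyze special requirements from description"""
--     requirements = {
--         'human_interaction': any(word in keywords for word in ['approval', 'confirm', 'verify', 'otp', 'captcha']),
--         'otp': any(word in keywords for word in ['otp', '2fa', 'verification', 'code']),
--         'captcha': any(word in keywords for word in ['captcha', 'robot', 'human']),
--         'file_handling': any(word in keywords for word in ['upload', 'download', 'file', 'document']),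
--         'multi_tab': any(word in keywords for word in ['multiple', 'tabs', 'windows', 'parallel']),
--         'api_integration': any(word in keywords for word in ['api', 'integration', 'webhook', 'service'])
--     }
--
--     return requirements
-- ===== SOURCE B (Python) =====
-- from typing import Dict, List
--
-- _HUMAN = frozenset(['approval', 'confirm', 'verify', 'otp', 'captcha'])
-- _OTP = frozenset(['otp', '2fa', 'verification', 'code'])
-- _CAPTCHA = frozenset(['captcha', 'robot', 'human'])
-- _FILE = frozenset(['upload', 'download', 'file', 'document'])
-- _MULTI = frozenset(['multiple', 'tabs', 'windows', 'parallel'])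
-- _API = frozenset(['api', 'integration', 'webhook', 'service'])
--
-- def _analyze_special_requirements(description: str, keywords: List[str]) -> Dict[str, bool]:
--     """Single pass over keywords, flipping six flags by set membership."""
--     hi = otp = cap = fh = mt = api = False
--     for kw in keywords:
--         if kw in _HUMAN:
--             hi = True
--         if kw in _OTP:
--             otp = True
--         if kw in _CAPTCHA:
--             cap = True
--         if kw in _FILE:
--             fh = True
--         if kw in _MULTI:
--             mt = True
--         if kw in _API:
--             api = True
--     return {
--         'human_interaction': hi,
--         'otp': otp,
--         'captcha': cap,
--         'file_handling': fh,
--         'multi_tab': mt,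
--         'api_integration': api,
--     }
-- ===== Notes on version B (the rewrite author's own statement) =====
-- stated objective: alternative
-- what changed: Replaces six separate any()-scans of category word lists against keywords with a single pass over keywords that flips six flags via frozenset membership.
import Mathlib
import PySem

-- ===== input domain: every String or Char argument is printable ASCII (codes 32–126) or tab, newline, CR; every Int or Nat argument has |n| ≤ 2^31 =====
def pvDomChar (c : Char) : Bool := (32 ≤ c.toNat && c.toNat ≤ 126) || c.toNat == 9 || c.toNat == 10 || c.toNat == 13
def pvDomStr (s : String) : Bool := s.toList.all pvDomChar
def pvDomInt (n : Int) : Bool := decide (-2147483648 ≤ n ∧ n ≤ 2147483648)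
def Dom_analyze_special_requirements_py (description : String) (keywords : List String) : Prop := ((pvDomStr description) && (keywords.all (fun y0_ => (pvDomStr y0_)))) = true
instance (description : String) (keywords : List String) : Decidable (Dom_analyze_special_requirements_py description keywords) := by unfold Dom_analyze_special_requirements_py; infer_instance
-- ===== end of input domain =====

-- ===== PORT A =====
-- A: six independent any()-scans, each testing a category word list against `keywords`.
def analyze_special_requirements_py (description : String) (keywords : List String) : List (String × Bool) :=
  [("human_interaction", (["approval", "confirm", "verify", "otp", "captcha"].any (fun word => keywords.contains word))),
   ("otp", (["otp", "2fa", "verification", "code"].any (fun word => keywords.contains word))),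
   ("captcha", (["captcha", "robot", "human"].any (fun word => keywords.contains word))),
   ("file_handling", (["upload", "download", "file", "document"].any (fun word => keywords.contains word))),
   ("multi_tab", (["multiple", "tabs", "windows", "parallel"].any (fun word => keywords.contains word))),
   ("api_integration", (["api", "integration", "webhook", "service"].any (fun word => keywords.contains word)))]

-- ===== PORT B =====
-- B: one pass over keywords, flipping six flags by category-set membership.
def pvHuman : PySem.Set String := PySem.Set.ofList ["approval", "confirm", "verify", "otp", "captcha"]
def pvOtp : PySem.Set String := PySem.Set.ofList ["otp", "2fa", "verification", "code"]
def pvCaptcha : PySem.Set String := PySem.Set.ofList ["captcha", "robot", "human"]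
def pvFile : PySem.Set String := PySem.Set.ofList ["upload", "download", "file", "document"]
def pvMulti : PySem.Set String := PySem.Set.ofList ["multiple", "tabs", "windows", "parallel"]
def pvApi : PySem.Set String := PySem.Set.ofList ["api", "integration", "webhook", "service"]

def analyze_special_requirements_py_alt (description : String) (keywords : List String) : List (String × Bool) :=
  let flags := keywords.foldl
    (fun (s : Bool × Bool × Bool × Bool × Bool × Bool) kw =>
      -- six independent if-statements of Source B, each setting its own flag
      (if pvHuman.contains kw then true else s.1,
       if pvOtp.contains kw then true else s.2.1,
       if pvCaptcha.contains kw then true else s.2.2.1,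
       if pvFile.contains kw then true else s.2.2.2.1,
       if pvMulti.contains kw then true else s.2.2.2.2.1,
       if pvApi.contains kw then true else s.2.2.2.2.2))
    (false, false, false, false, false, false)
  [("human_interaction", flags.1), ("otp", flags.2.1), ("captcha", flags.2.2.1),
   ("file_handling", flags.2.2.2.1), ("multi_tab", flags.2.2.2.2.1), ("api_integration", flags.2.2.2.2.2)]

-- ===== PRECONDITION & SPEC =====
def Spec_analyze_special_requirements_py (description : String) (keywords : List String) (out : List (String × Bool)) : Prop := out = analyze_special_requirements_py_alt description keywords
instance (description : String) (keywords : List String) (out : List (String × Bool)) : Decidable (Spec_analyze_special_requirements_py description keywords out) := by unfold Spec_analyze_special_requirements_py; infer_instance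

-- ===== CLAIM (what is proved, stated in full; the proofs are below) =====
def Claim_equal_analyze_special_requirements_py : Prop := ∀ (description : String) (keywords : List String), Dom_analyze_special_requirements_py description keywords → Spec_analyze_special_requirements_py description keywords (analyze_special_requirements_py description keywords)

-- ===== LEMMAS AND PROOFS =====

-- B's one-pass fold, computed componentwise: each flag ends as "initial || any keyword in that set".
theorem pv_fold_components (keywords : List String) (s : Bool × Bool × Bool × Bool × Bool × Bool) :
    keywords.foldl
      (fun (s : Bool × Bool × Bool × Bool × Bool × Bool) kw =>
        (if pvHuman.contains kw then true else s.1,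
         if pvOtp.contains kw then true else s.2.1,
         if pvCaptcha.contains kw then true else s.2.2.1,
         if pvFile.contains kw then true else s.2.2.2.1,
         if pvMulti.contains kw then true else s.2.2.2.2.1,
         if pvApi.contains kw then true else s.2.2.2.2.2)) s
    = (s.1 || keywords.any (fun kw => pvHuman.contains kw),
       s.2.1 || keywords.any (fun kw => pvOtp.contains kw),
       s.2.2.1 || keywords.any (fun kw => pvCaptcha.contains kw),
       s.2.2.2.1 || keywords.any (fun kw => pvFile.contains kw),
       s.2.2.2.2.1 || keywords.any (fun kw => pvMulti.contains kw),
       s.2.2.2.2.2 || keywords.any (fun kw => pvApi.contains kw)) := by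
  induction keywords generalizing s with
  | nil => simp
  | cons k tl ih =>
      simp only [List.foldl_cons]
      rw [ih]
      simp [Bool.or_assoc, Bool.or_comm, Bool.if_true_left]

-- nonempty intersection is symmetric: scanning the category list against keywords
-- equals scanning keywords against the category list.
theorem pv_any_swap (l1 l2 : List String) :
    l1.any (fun w => l2.contains w) = l2.any (fun k => l1.contains k) := by
  rcases h : l1.any (fun w => l2.contains w) with _ | _
  · symm
    rw [Bool.eq_false_iff]
    intro h2
    rw [List.any_eq_false] at h
    rw [List.any_eq_true] at h2
    obtain ⟨k, hk, hkl⟩ := h2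
    simp only [List.contains_eq_mem, decide_eq_true_eq] at hkl
    exact absurd (by simpa using hk) (by simpa using h k hkl)
  · symm
    rw [List.any_eq_true] at h ⊢
    obtain ⟨w, hw, hwl⟩ := h
    exact ⟨w, by simpa using hwl, by simpa using hw⟩

-- ===== VERDICT (by name: the statement is the Claim_ definition above) =====
theorem analyze_special_requirements_py_spec : Claim_equal_analyze_special_requirements_py := by
  intro description keywords _
  unfold Spec_analyze_special_requirements_py
  unfold analyze_special_requirements_py analyze_special_requirements_py_alt
  simp only [pv_fold_components, Bool.false_or]
  simp only [pvHuman, pvOtp, pvCaptcha, pvFile, pvMulti, pvApi, PySem.Set.ofList]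
  refine congrArg₂ _ ?_ (congrArg₂ _ ?_ (congrArg₂ _ ?_ (congrArg₂ _ ?_ (congrArg₂ _ ?_ (congrArg₂ _ ?_ rfl))))) <;>
    refine congrArg _ ?_ <;>
    rw [pv_any_swap] <;> norm_num [PySem.Set.contains] <;>
    (congr 1; funext k; simp [Bool.or_assoc])
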